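-- pv_equiv track=rewrite | github.com/jyc0011/backjoon | 프로그래머스/1/92334. 신고 결과 받기/신고 결과 받기.py | solution
-- ===== SOURCE A (Python) =====
-- from collections import defaultdict
--
-- def solution(id_list, report, k):
--     answer = [0] * len(id_list)
--     reportCnt = defaultdict(set)
--     mapping = {id_str: i for i, id_str in enumerate(id_list)}
--     for r in set(report):
--         reporter, reported = r.split()
--         reportCnt[reported].add(reporter)
--     for reported, reporters in reportCnt.items():
--         if len(reporters) >= k:
--             for reporter in reporters:
--                 answer[mapping[reporter]] += 1
--     return answer
-- ===== SOURCE B (Python) =====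
-- def solution(id_list, report, k):
--     # Sort the deduped (reporter, reported) pairs by reported target, then one
--     # linear scan over consecutive equal-target runs: a run of length >= k
--     # credits its reporters; each user's answer is a count over the credited
--     # reporters. No dictionaries at all (A groups with a dict of sets).
--     pairs = sorted({tuple(r.split()) for r in report}, key=lambda p: p[1])
--     credited = []
--     i = 0
--     while i < len(pairs):
--         j = i
--         while j < len(pairs) and pairs[j][1] == pairs[i][1]:
--             j += 1
--         if j - i >= k:
--             for p in pairs[i:j]:
--                 credited.append(p[0])
--         i = j
--     return [credited.count(u) for u in id_list]
-- ===== Notes on version B (the rewrite author's own statement) =====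
-- stated objective: alternative
-- what changed: A groups reports with a dict mapping each reported user to the set of its reporters and bumps a mapping-indexed answer array in a nested loop; B uses no dictionaries: it sorts the deduped (reporter, reported) pairs by target, run-scans the sorted list crediting the reporters of runs of length >= k, and builds the answer positionally as a per-user count over the credited reporters.
-- outside the precondition, e.g. on solution(['a', 'a'], ['a a'], 1): A returns [0, 1], B returns [1, 1]
import Mathlib
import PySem

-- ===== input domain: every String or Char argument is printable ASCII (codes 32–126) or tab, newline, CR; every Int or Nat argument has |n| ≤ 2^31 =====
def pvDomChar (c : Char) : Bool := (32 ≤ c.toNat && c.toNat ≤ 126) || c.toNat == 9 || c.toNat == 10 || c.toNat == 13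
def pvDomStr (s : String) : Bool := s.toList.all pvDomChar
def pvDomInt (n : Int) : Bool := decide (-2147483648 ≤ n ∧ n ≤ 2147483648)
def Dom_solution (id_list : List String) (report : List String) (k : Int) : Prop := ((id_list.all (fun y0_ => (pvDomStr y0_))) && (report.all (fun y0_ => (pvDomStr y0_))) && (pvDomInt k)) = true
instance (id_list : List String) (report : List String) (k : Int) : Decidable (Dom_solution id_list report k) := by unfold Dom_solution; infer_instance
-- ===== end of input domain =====

-- B drops A's dictionaries entirely: it sorts the deduped (reporter, reported) pairs by
-- target, run-scans the sorted list crediting reporters of runs of length >= k, and builds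
-- the answer positionally as a per-user count (objective: alternative).

-- ===== PORT A =====
def solution (id_list : List String) (report : List String) (k : Int) : List Int :=
  let answer : List Int := List.replicate id_list.length 0
  let mapping : PySem.Dict String Int :=
    (PySem.List.enumerate id_list 0).foldl (fun d p => d.insert p.2 p.1) PySem.Dict.empty
  let reportCnt : PySem.Dict String (PySem.Set String) :=
    (PySem.Set.ofList report).foldl (fun d r =>
      match PySem.Str.split₀ r with
      | [reporter, reported] => d.modify reported [] (fun s => PySem.Set.add s reporter)
      | _ => d          -- Python raises ValueError here (unpacking); excluded by Pre_
      ) PySem.Dict.empty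
  reportCnt.items.foldl (fun ans x =>
    if k ≤ (PySem.Set.len x.2 : Int) then
      x.2.foldl (fun ans reporter =>
        -- mapping[reporter]: KeyError when reporter ∉ id_list is excluded by Pre_ (getD 0 there)
        ans.set (mapping.getD reporter 0).toNat (ans.getD (mapping.getD reporter 0).toNat 0 + 1)) ans
    else ans) answer

-- ===== PORT B =====
-- the outer 'while i < len(pairs)' loop of Source B, as recursion on the remaining suffix:
-- the inner 'while' computes the current equal-target run (takeWhile), 'i = j' drops it (dropWhile)
def pvRunScan (k : Int) (pairs : List (String × String)) (credited : List String) : List String :=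
  match pairs with
  | [] => credited
  | p :: t =>
    let run := (p :: t).takeWhile (fun q => q.2 == p.2)
    let rest := (p :: t).dropWhile (fun q => q.2 == p.2)
    pvRunScan k rest (if k ≤ (run.length : Int) then credited ++ run.map Prod.fst else credited)
termination_by pairs.length
decreasing_by
  simp only [List.dropWhile_cons, beq_self_eq_true, if_true, List.length_cons]
  exact Nat.lt_succ_of_le (List.length_dropWhile_le _ t)

def solution_alt (id_list : List String) (report : List String) (k : Int) : List Int :=
  let pairs : List (String × String) :=
    PySem.List.sorted
      (PySem.Set.ofList (report.map (fun r =>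
        let w := PySem.Str.split₀ r
        -- w[0], w[1]: IndexError when the report has fewer than two words is excluded by Pre_
        (w.getD 0 "", w.getD 1 ""))))
      (fun p => p.2)
  let credited : List String := pvRunScan k pairs []
  id_list.map (fun u => (PySem.List.count credited u : Int))

-- ===== PRECONDITION & SPEC =====
-- a (reporter, reported) pair as A and B both read a report
def pvPair (r : String) : String × String :=
  ((PySem.Str.split₀ r).getD 0 "", (PySem.Str.split₀ r).getD 1 "")
-- Pre_ excludes inputs where A raises — a report that does not split into exactly two words
-- (ValueError on unpacking) and a report whose target reaches the threshold of distinct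
-- reporters while the reporter is missing from id_list (KeyError) — and id_lists with
-- duplicate ids, on which A's credited position is the dict-overwrite (last-occurrence)
-- index, an accidental tie-break B does not share.
def Pre_solution (id_list : List String) (report : List String) (k : Int) : Prop :=
  (∀ r ∈ report, (PySem.Str.split₀ r).length = 2)
  ∧ id_list.Nodup
  ∧ ∀ r ∈ report,
      k ≤ (((PySem.Set.ofList (report.map pvPair)).countP
              (fun q => q.2 == (PySem.Str.split₀ r).getD 1 "")) : Int)
      → (PySem.Str.split₀ r).headI ∈ id_list
instance (id_list : List String) (report : List String) (k : Int) : Decidable (Pre_solution id_list report k) := by unfold Pre_solution; infer_instance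
def pvWitness_solution : List String × List String × Int := (["muzi", "frodo"], ["muzi frodo", "frodo muzi"], 1)

def Spec_solution (id_list : List String) (report : List String) (k : Int) (out : List Int) : Prop := out = solution_alt id_list report k
instance (id_list : List String) (report : List String) (k : Int) (out : List Int) : Decidable (Spec_solution id_list report k out) := by unfold Spec_solution; infer_instance

-- ===== CLAIM (what is proved, stated in full; the proofs are below) =====
def Claim_equal_solution : Prop := ∀ (id_list : List String) (report : List String) (k : Int), Dom_solution id_list report k → Pre_solution id_list report k → Spec_solution id_list report k (solution id_list report k)

-- ===== LEMMAS AND PROOFS =====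

-- shared abbreviations (proof-only)
def pvBump (ans : List Int) (i : Nat) : List Int := ans.set i (ans.getD i 0 + 1)
def pvStep (d : PySem.Dict String (PySem.Set String)) (p : String × String) :
    PySem.Dict String (PySem.Set String) :=
  d.modify p.2 [] (fun s => PySem.Set.add s p.1)
def pvMapping (id_list : List String) : PySem.Dict String Int :=
  (PySem.List.enumerate id_list 0).foldl (fun d p => d.insert p.2 p.1) PySem.Dict.empty
def pvIdx (id_list : List String) (rep : String) : Nat :=
  ((pvMapping id_list).getD rep 0).toNat
def pvM (report : List String) : List (String × String) := (PySem.Set.ofList report).map pvPair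
def pvP (report : List String) : PySem.Set (String × String) := PySem.Set.ofList (report.map pvPair)
def pvS (report : List String) (u : String) : PySem.Set String :=
  PySem.Set.ofList (((pvM report).filter (fun p => p.2 == u)).map Prod.fst)

theorem pv_foldl_bump_length (l : List Nat) (a : List Int) : (l.foldl pvBump a).length = a.length := by
  induction l generalizing a with
  | nil => rfl
  | cons i t ih => simpa [pvBump] using ih (pvBump a i)

theorem pv_getD_bump (a : List Int) (i j : Nat) (hj : j < a.length) :
    (pvBump a i).getD j 0 = a.getD j 0 + (if i = j then 1 else 0) := by
  unfold pvBump
  rcases eq_or_ne i j with h | h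
  · subst h
    simp [List.getD_eq_getElem?_getD, hj]
  · simp [List.getD_eq_getElem?_getD, h]

theorem pv_foldl_bump_getD (l : List Nat) (a : List Int) (j : Nat) (hj : j < a.length) :
    (l.foldl pvBump a).getD j 0 = a.getD j 0 + (l.count j : Int) := by
  induction l generalizing a with
  | nil => simp
  | cons i t ih =>
    have hlen : j < (pvBump a i).length := by simpa [pvBump] using hj
    rw [List.foldl_cons, ih (pvBump a i) hlen, pv_getD_bump a i j hj]
    have : (i :: t).count j = t.count j + (if i = j then 1 else 0) := by
      simp [List.count_cons, beq_iff_eq]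
    rw [this]
    push_cast
    split <;> ring

theorem pv_foldl_if_flat {α : Type} (L : List α) (c : α → Prop) [DecidablePred c]
    (g : α → List Nat) (a : List Int) :
    L.foldl (fun ans x => if c x then (g x).foldl pvBump ans else ans) a
      = ((L.filter (fun x => decide (c x))).flatMap g).foldl pvBump a := by
  induction L generalizing a with
  | nil => rfl
  | cons x t ih =>
    by_cases hc : c x
    · simp [hc, List.foldl_append, ih]
    · simp [hc, ih]

theorem pv_count_flatMap {α : Type} (L : List α) (g : α → List Nat) (j : Nat) :
    (L.flatMap g).count j = (L.map (fun x => (g x).count j)).sum := by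
  induction L with
  | nil => rfl
  | cons x t ih => simp [List.flatMap_cons, List.count_append, ih]

theorem pv_getD_stepfold (L : List (String × String)) (d : PySem.Dict String (PySem.Set String)) (u : String) :
    (L.foldl pvStep d).getD u [] =
      PySem.Set.update (d.getD u []) ((L.filter (fun p => p.2 == u)).map Prod.fst) := by
  induction L generalizing d with
  | nil => simp [PySem.Set.update]
  | cons p t ih =>
    rw [List.foldl_cons, ih]
    by_cases hu : p.2 = u
    · have h1 : (pvStep d p).getD u [] = PySem.Set.add (d.getD u []) p.1 := by
        unfold pvStep
        rw [PySem.Dict.getD_modify]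
        simp [hu]
      rw [h1, List.filter_cons]
      simp only [hu, beq_self_eq_true, if_pos, List.map_cons]
      rfl
    · have h1 : (pvStep d p).getD u [] = d.getD u [] := by
        unfold pvStep
        rw [PySem.Dict.getD_modify]
        simp [Ne.symm hu]
      rw [h1, List.filter_cons]
      simp [hu]

theorem pv_ofList_append {α : Type} [BEq α] (xs : List α) (x : α) :
    PySem.Set.ofList (xs ++ [x]) = PySem.Set.add (PySem.Set.ofList xs) x := by
  simp [PySem.Set.ofList_eq_foldl, List.foldl_append]

theorem pv_add_of_mem {α : Type} [BEq α] [LawfulBEq α] {s : PySem.Set α} {x : α} (h : x ∈ s) :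
    PySem.Set.add s x = s := by
  simp [PySem.Set.add, PySem.Set.contains, h]

theorem pv_add_of_not_mem {α : Type} [BEq α] [LawfulBEq α] {s : PySem.Set α} {x : α} (h : x ∉ s) :
    PySem.Set.add s x = s ++ [x] := by
  simp [PySem.Set.add, PySem.Set.contains, h]

theorem pv_ofList_map_ofList {α β : Type} [BEq α] [LawfulBEq α] [BEq β] [LawfulBEq β]
    (f : α → β) (xs : List α) :
    PySem.Set.ofList ((PySem.Set.ofList xs).map f) = PySem.Set.ofList (xs.map f) := by
  induction xs using List.reverseRecOn with
  | nil => rfl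
  | append_singleton xs x ih =>
    rw [pv_ofList_append, List.map_append, List.map_singleton, pv_ofList_append]
    by_cases hx : x ∈ PySem.Set.ofList xs
    · have hfx : f x ∈ PySem.Set.ofList (xs.map f) := by
        rw [PySem.Set.mem_ofList]
        exact List.mem_map_of_mem ((PySem.Set.mem_ofList xs x).mp hx)
      rw [pv_add_of_mem hx, ih, pv_add_of_mem hfx]
    · rw [pv_add_of_not_mem hx, List.map_append, List.map_singleton, pv_ofList_append, ih]

theorem pv_ofList_map_fst_filter {α β : Type} [BEq α] [LawfulBEq α] [BEq β] [LawfulBEq β]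
    (M : List (α × β)) (u : β) :
    PySem.Set.ofList ((M.filter (fun p => p.2 == u)).map Prod.fst)
      = ((PySem.Set.ofList M).filter (fun p => p.2 == u)).map Prod.fst := by
  induction M using List.reverseRecOn with
  | nil => rfl
  | append_singleton M p ih =>
    by_cases hq : p.2 = u
    · have hfL : (M ++ [p]).filter (fun q => q.2 == u) = M.filter (fun q => q.2 == u) ++ [p] := by
        simp [List.filter_append, hq]
      by_cases hm : p ∈ M
      · have hmem : p.1 ∈ PySem.Set.ofList ((M.filter (fun q => q.2 == u)).map Prod.fst) := by
          rw [PySem.Set.mem_ofList]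
          exact List.mem_map_of_mem (List.mem_filter.mpr ⟨hm, by simp [hq]⟩)
        rw [hfL, List.map_append, List.map_singleton, pv_ofList_append, pv_add_of_mem hmem, ih,
            pv_ofList_append, pv_add_of_mem (by rw [PySem.Set.mem_ofList]; exact hm)]
      · have hnm : p.1 ∉ PySem.Set.ofList ((M.filter (fun q => q.2 == u)).map Prod.fst) := by
          rw [PySem.Set.mem_ofList]
          intro hc
          obtain ⟨q, hqmem, hq1⟩ := List.mem_map.mp hc
          have hq2 : q.2 = u := by simpa using (List.mem_filter.mp hqmem).2
          have : q = p := Prod.ext hq1 (hq2.trans hq.symm)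
          exact hm (this ▸ (List.mem_filter.mp hqmem).1)
        rw [hfL, List.map_append, List.map_singleton, pv_ofList_append, pv_add_of_not_mem hnm, ih,
            pv_ofList_append, pv_add_of_not_mem (by rw [PySem.Set.mem_ofList]; exact hm)]
        simp [List.filter_append, hq]
    · have hfL : (M ++ [p]).filter (fun q => q.2 == u) = M.filter (fun q => q.2 == u) := by
        simp [List.filter_append, hq]
      rw [hfL, ih, pv_ofList_append]
      by_cases hm : p ∈ PySem.Set.ofList M
      · rw [pv_add_of_mem hm]
      · rw [pv_add_of_not_mem hm, List.filter_append]
        simp [hq]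

theorem pv_sum_map_filter {α : Type} (L : List α) (c : α → Bool) (t : α → Nat) :
    ((L.filter c).map t).sum = (L.map (fun u => if c u then t u else 0)).sum := by
  induction L with
  | nil => rfl
  | cons x l ih =>
    by_cases hc : c x = true
    · simp [hc, ih]
    · have hcf : c x = false := by simpa using hc
      simp [hcf, ih]

theorem pv_countP_partition {α : Type} (P : List α) (q g : α → Bool) :
    P.countP g = (P.filter q).countP g + (P.filter (fun x => !(q x))).countP g := by
  induction P with
  | nil => rfl
  | cons x t ih =>
    cases hq : q x <;> cases hg : g x <;>
      simp [hq, hg, ih] <;> omega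

theorem pv_partition_count (U : List String) (P : List (String × String))
    (c : String → Bool) (h : String × String → Bool)
    (hnd : U.Nodup) (hcov : ∀ p ∈ P, p.2 ∈ U) :
    (U.map (fun u => if c u then (P.filter (fun p => p.2 == u)).countP h else 0)).sum
      = P.countP (fun p => c p.2 && h p) := by
  induction U generalizing P with
  | nil =>
    have : P = [] := by
      cases P with
      | nil => rfl
      | cons p t => exact absurd (hcov p (List.mem_cons_self)) (List.not_mem_nil)
    simp [this]
  | cons u U' ih =>
    rw [List.map_cons, List.sum_cons,
        pv_countP_partition P (fun p => p.2 == u) (fun p => c p.2 && h p)]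
    have hfirst : (if c u then (P.filter (fun p => p.2 == u)).countP h else 0)
        = (P.filter (fun p => p.2 == u)).countP (fun p => c p.2 && h p) := by
      by_cases hcu : c u = true
      · rw [if_pos hcu]
        apply List.countP_congr
        intro p hp
        have : p.2 = u := by simpa using (List.mem_filter.mp hp).2
        simp [this, hcu]
      · rw [if_neg hcu]
        symm
        rw [List.countP_eq_zero]
        intro p hp
        have h2 : p.2 = u := by simpa using (List.mem_filter.mp hp).2
        have hcf : c u = false := by simpa using hcu
        simp [h2, hcf]
    have hrest : (U'.map (fun v => if c v then (P.filter (fun p => p.2 == v)).countP h else 0)).sum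
        = (P.filter (fun p => !(p.2 == u))).countP (fun p => c p.2 && h p) := by
      have hmap : ∀ v ∈ U', (if c v then (P.filter (fun p => p.2 == v)).countP h else 0)
          = (if c v then ((P.filter (fun p => !(p.2 == u))).filter (fun p => p.2 == v)).countP h else 0) := by
        intro v hv
        have hvu : v ≠ u := by
          rintro rfl
          exact (List.nodup_cons.mp hnd).1 hv
        have : P.filter (fun p => p.2 == v)
            = (P.filter (fun p => !(p.2 == u))).filter (fun p => p.2 == v) := by
          rw [List.filter_filter]
          apply List.filter_congr
          intro p _
          by_cases hp : p.2 = v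
          · simp [hp, hvu]
          · simp [hp]
        rw [this]
      rw [List.map_congr_left hmap]
      apply ih
      · exact (List.nodup_cons.mp hnd).2
      · intro p hp
        have hpP := (List.mem_filter.mp hp).1
        have hne : ¬(p.2 = u) := by simpa using (List.mem_filter.mp hp).2
        have := hcov p hpP
        rcases List.mem_cons.mp this with h1 | h2
        · exact absurd h1 hne
        · exact h2
    rw [hfirst, hrest]

theorem pv_count_map {α β : Type} [BEq β] [LawfulBEq β] (l : List α) (f : α → β) (j : β) :
    (l.map f).count j = l.countP (fun x => f x == j) := by
  simp [List.count, List.countP_map]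
  rfl

def pvSusp (report : List String) (k : Int) : PySem.Set String :=
  PySem.Set.ofList
    (((PySem.Dict.counter ((pvP report).map Prod.snd)).items.filter
        (fun x => decide (k ≤ x.2))).map Prod.fst)

theorem pv_A_char (il rp : List String) (k : Int)
    (hpre : ∀ r ∈ rp, (PySem.Str.split₀ r).length = 2) :
    solution il rp k =
      (((((pvM rp).foldl pvStep PySem.Dict.empty).items.filter
          (fun x => decide (k ≤ PySem.Set.len x.2))).flatMap
          (fun x => x.2.map (pvIdx il))).foldl pvBump (List.replicate il.length 0)) := by
  unfold solution
  dsimp only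
  have hdict : (PySem.Set.ofList rp).foldl (fun d r =>
      match PySem.Str.split₀ r with
      | [reporter, reported] => d.modify reported [] (fun s => PySem.Set.add s reporter)
      | _ => d) (PySem.Dict.empty : PySem.Dict String (PySem.Set String))
      = (pvM rp).foldl pvStep PySem.Dict.empty := by
    rw [pvM, List.foldl_map]
    apply PySem.List.foldl_congr_mem
    intro acc r hr
    obtain ⟨a, b, hab⟩ := List.length_eq_two.mp (hpre r ((PySem.Set.mem_ofList rp r).mp hr))
    rw [hab]
    unfold pvStep pvPair
    rw [hab]
    rfl
  rw [hdict]
  have houter : ∀ (L : List (String × PySem.Set String)) (a : List Int),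
      L.foldl (fun ans x =>
        if k ≤ (PySem.Set.len x.2 : Int) then
          x.2.foldl (fun ans reporter =>
            ans.set (pvIdx il reporter) (ans.getD (pvIdx il reporter) 0 + 1)) ans
        else ans) a
      = ((L.filter (fun x => decide (k ≤ PySem.Set.len x.2))).flatMap
          (fun x => x.2.map (pvIdx il))).foldl pvBump a := by
    intro L a
    rw [← pv_foldl_if_flat L (fun x => k ≤ PySem.Set.len x.2) (fun x => x.2.map (pvIdx il)) a]
    apply PySem.List.foldl_congr_mem
    intro acc x _
    by_cases hc : k ≤ (PySem.Set.len x.2 : Int)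
    · rw [if_pos hc, if_pos hc, List.foldl_map]
      rfl
    · rw [if_neg hc, if_neg hc]
  exact houter _ _

-- the suspended-set membership test IS the threshold test on the pair-level count
theorem pv_contains_susp (rp : List String) (k : Int) {p : String × String} (hp : p ∈ pvP rp) :
    PySem.Set.contains (pvSusp rp k) p.2
      = decide (k ≤ ((pvP rp).countP (fun q => q.2 == p.2) : Int)) := by
  have hsusp_list : pvSusp rp k
      = PySem.Set.ofList ((PySem.Set.ofList ((pvP rp).map Prod.snd)).filter
          (fun u => decide (k ≤ (List.count u ((pvP rp).map Prod.snd) : Int)))) := by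
    rw [pvSusp, PySem.Dict.items_counter, List.filter_map, List.map_map]
    simp [Function.comp_def]
  have hcnt : List.count p.2 ((pvP rp).map Prod.snd)
      = (pvP rp).countP (fun q => q.2 == p.2) := by
    rw [List.count_eq_countP, List.countP_map]
    rfl
  have hiff : (PySem.Set.contains (pvSusp rp k) p.2 = true)
      ↔ (k ≤ ((pvP rp).countP (fun q => q.2 == p.2) : Int)) := by
    rw [PySem.Set.contains_iff, hsusp_list, PySem.Set.mem_ofList, List.mem_filter]
    constructor
    · intro ⟨_, h2⟩
      rw [hcnt] at h2
      exact of_decide_eq_true h2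
    · intro h
      refine ⟨(PySem.Set.mem_ofList _ _).mpr (List.mem_map_of_mem hp), ?_⟩
      rw [hcnt]
      exact decide_eq_true h
  by_cases hk : k ≤ ((pvP rp).countP (fun q => q.2 == p.2) : Int)
  · rw [hiff.mpr hk, decide_eq_true hk]
  · rw [decide_eq_false hk]
    exact Bool.eq_false_iff.mpr (fun hc => hk (hiff.mp hc))

-- the j-th bump count of A's grouped nested loop, flattened to a pair-level countP over pvP
theorem pv_counts (il rp : List String) (k : Int) (j : Nat) :
    (((((pvM rp).foldl pvStep PySem.Dict.empty).items.filter
        (fun x => decide (k ≤ PySem.Set.len x.2))).flatMap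
        (fun x => x.2.map (pvIdx il))).count j)
      = (pvP rp).countP (fun p =>
          PySem.Set.contains (pvSusp rp k) p.2 && (pvIdx il p.1 == j)) := by
  have hPM : PySem.Set.ofList (pvM rp) = pvP rp := by
    rw [pvM, pvP, pv_ofList_map_ofList]
  have hE : PySem.Set.ofList ((pvM rp).map Prod.snd)
      = PySem.Set.ofList ((pvP rp).map Prod.snd) := by
    rw [pvM, List.map_map, pv_ofList_map_ofList, pvP, pv_ofList_map_ofList, List.map_map]
  have hS : ∀ u, pvS rp u = ((pvP rp).filter (fun p => p.2 == u)).map Prod.fst := by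
    intro u
    rw [pvS, pv_ofList_map_fst_filter, hPM]
  have hkeysnodup : ((pvM rp).foldl pvStep PySem.Dict.empty).keys.Nodup := by
    have h := PySem.Dict.nodup_keys_foldl_modify_key (pvM rp) Prod.snd
      ([] : PySem.Set String) (fun _ p => fun s => PySem.Set.add s p.1) PySem.Dict.empty
      (by simp [PySem.Dict.keys_empty])
    simpa [pvStep] using h
  have hkeys : ((pvM rp).foldl pvStep PySem.Dict.empty).keys
      = PySem.Set.ofList ((pvM rp).map Prod.snd) := by
    have h := PySem.Dict.keys_foldl_modify_key (pvM rp) Prod.snd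
      ([] : PySem.Set String) (fun _ p => fun s => PySem.Set.add s p.1) PySem.Dict.empty
    simpa [pvStep, PySem.Dict.keys_empty, PySem.Set.update_nil_left] using h
  have hitems : ((pvM rp).foldl pvStep PySem.Dict.empty).items
      = (PySem.Set.ofList ((pvP rp).map Prod.snd)).map (fun u => (u, pvS rp u)) := by
    rw [PySem.Dict.items_eq_map_keys _ hkeysnodup ([] : PySem.Set String), hkeys, hE]
    apply List.map_congr_left
    intro u _
    rw [pv_getD_stepfold, PySem.Dict.getD_empty, PySem.Set.update_nil_left, pvS]
  rw [hitems, List.filter_map, pv_count_flatMap, List.map_map, pv_sum_map_filter]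
  have hsummand : ∀ u, (if ((fun x => decide (k ≤ PySem.Set.len x.2)) ∘ (fun u => (u, pvS rp u))) u = true
        then ((fun x => (x.2.map (pvIdx il)).count j) ∘ (fun u => (u, pvS rp u))) u else 0)
      = (if decide (k ≤ ((pvP rp).countP (fun q => q.2 == u) : Int)) = true
        then ((pvP rp).filter (fun q => q.2 == u)).countP (fun p => pvIdx il p.1 == j) else 0) := by
    intro u
    have hlen : PySem.Set.len (pvS rp u) = ((pvP rp).countP (fun q => q.2 == u) : Int) := by
      rw [hS u, PySem.Set.len_eq, List.length_map, ← List.countP_eq_length_filter]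
    have hcnt2 : ((pvS rp u).map (pvIdx il)).count j
        = ((pvP rp).filter (fun q => q.2 == u)).countP (fun p => pvIdx il p.1 == j) := by
      rw [hS u, List.map_map, pv_count_map]
      rfl
    simp only [Function.comp_apply]
    rw [hlen, hcnt2]
  rw [List.map_congr_left (fun u _ => hsummand u)]
  rw [pv_partition_count _ _ _ _ (PySem.Set.nodup_ofList _)
      (fun p hp => (PySem.Set.mem_ofList _ _).mpr (List.mem_map_of_mem hp))]
  apply List.countP_congr
  intro p hp
  rw [pv_contains_susp rp k hp]

-- B's run scan over a key-sorted pair list counts, per reporter, the pairs whose target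
-- clears the threshold
theorem pv_runScan_count (k : Int) (l : List (String × String)) (c : List String) :
    l.Pairwise (fun a b => a.2 ≤ b.2) → ∀ u : String,
    (pvRunScan k l c).count u
      = c.count u + l.countP (fun p =>
          p.1 == u && decide (k ≤ (l.countP (fun q => q.2 == p.2) : Int))) := by
  induction l, c using pvRunScan.induct k with
  | case1 c => intro _ u; simp [pvRunScan]
  | case2 c p t run rest ih =>
    intro hsort u
    have hrestdef : rest = (p :: t).dropWhile (fun q => q.2 == p.2) := rfl
    have hsplit : run ++ rest = p :: t := List.takeWhile_append_dropWhile
    have hrun_mem : ∀ q ∈ run, q.2 = p.2 := by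
      intro q hq
      simpa using List.mem_takeWhile_imp hq
    have hsort' : (run ++ rest).Pairwise (fun a b => a.2 ≤ b.2) := by
      rw [hsplit]; exact hsort
    obtain ⟨hrunPW, hrestPW, hcross⟩ := List.pairwise_append.mp hsort'
    have hp_run : p ∈ run := by
      show p ∈ (p :: t).takeWhile (fun q => q.2 == p.2)
      rw [List.takeWhile_cons]
      simp
    have hrest_ne : ∀ q ∈ rest, ¬(q.2 = p.2) := by
      cases hrc : rest with
      | nil => intro q hq; exact absurd hq (List.not_mem_nil)
      | cons h r =>
        have hfind : (p :: t).find? (fun q => !(q.2 == p.2)) = some h := by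
          rw [List.find?_not_eq_head?_dropWhile]
          show rest.head? = some h
          rw [hrc]
          rfl
        have hh : ¬ (h.2 = p.2) := by
          simpa using List.find?_some hfind
        have hph : p.2 < h.2 := by
          have hle : p.2 ≤ h.2 := hcross p hp_run h (by rw [hrc]; simp)
          exact lt_of_le_of_ne hle (fun e => hh e.symm)
        intro q hq
        rcases List.mem_cons.mp hq with rfl | hqr
        · exact hh
        · have hhq : h.2 ≤ q.2 := by
            rw [hrc] at hrestPW
            exact (List.pairwise_cons.mp hrestPW).1 q hqr
          exact fun e => absurd (e ▸ lt_of_lt_of_le hph hhq) (lt_irrefl _)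
    have hcnt_l_p : (p :: t).countP (fun q => q.2 == p.2) = run.length := by
      rw [← hsplit, List.countP_append]
      have h1 : run.countP (fun q => q.2 == p.2) = run.length :=
        List.countP_eq_length.mpr (fun q hq => by simp [hrun_mem q hq])
      have h2 : rest.countP (fun q => q.2 == p.2) = 0 :=
        List.countP_eq_zero.mpr (fun q hq => by simp [hrest_ne q hq])
      rw [h1, h2, Nat.add_zero]
    have hinner_rest : ∀ q ∈ rest,
        (p :: t).countP (fun w => w.2 == q.2) = rest.countP (fun w => w.2 == q.2) := by
      intro q hq
      rw [← hsplit, List.countP_append]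
      have h0 : run.countP (fun w => w.2 == q.2) = 0 :=
        List.countP_eq_zero.mpr (fun w hw => by
          simp only [beq_iff_eq]
          rw [hrun_mem w hw]
          exact fun e => hrest_ne q hq e.symm)
      rw [h0, Nat.zero_add]
    have hinner_run : ∀ q ∈ run,
        (p :: t).countP (fun w => w.2 == q.2) = run.length := by
      intro q hq
      have : (fun w : String × String => w.2 == q.2) = (fun w => w.2 == p.2) := by
        funext w
        rw [hrun_mem q hq]
      rw [this, hcnt_l_p]
    have hrun_fst : (run.map Prod.fst).count u = run.countP (fun q => q.1 == u) := by
      rw [pv_count_map]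
    -- unfold one step of the scan
    rw [pvRunScan]
    have ih' := ih hrestPW u
    simp only [dite_eq_ite] at ih'
    show List.count u (pvRunScan k rest
        (if k ≤ (run.length : Int) then c ++ run.map Prod.fst else c))
      = List.count u c + (p :: t).countP (fun p' =>
          p'.1 == u && decide (k ≤ ((p :: t).countP (fun q => q.2 == p'.2) : Int)))
    rw [ih']
    -- credited counts
    have hc' : (if k ≤ (run.length : Int) then c ++ run.map Prod.fst else c).count u
        = c.count u + (if k ≤ (run.length : Int) then run.countP (fun q => q.1 == u) else 0) := by
      split
      · rw [List.count_append, hrun_fst]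
      · rw [Nat.add_zero]
    rw [hc']
    -- split the big countP over run ++ rest
    have hbig : (p :: t).countP (fun p' =>
          p'.1 == u && decide (k ≤ ((p :: t).countP (fun q => q.2 == p'.2) : Int)))
        = (if k ≤ (run.length : Int) then run.countP (fun q => q.1 == u) else 0)
          + rest.countP (fun p' =>
              p'.1 == u && decide (k ≤ (rest.countP (fun q => q.2 == p'.2) : Int))) := by
      rw [← hsplit, List.countP_append]
      congr 1
      · by_cases hk : k ≤ (run.length : Int)
        · rw [if_pos hk]
          apply List.countP_congr
          intro q hq
          rw [hsplit, hinner_run q hq]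
          simp [hk]
        · rw [if_neg hk]
          apply List.countP_eq_zero.mpr
          intro q hq
          rw [hsplit, hinner_run q hq]
          simp [hk]
      · apply List.countP_congr
        intro q hq
        rw [hsplit, hinner_rest q hq]
    rw [hbig]
    omega

-- the mapping dict built by enumerate-insert looks up the index of each id (unique ids)
theorem pv_mapping_getD (il : List String) (hnd : il.Nodup) (x : String) (hx : x ∈ il) :
    (pvMapping il).getD x 0 = (il.idxOf x : Int) := by
  induction il using List.reverseRecOn with
  | nil => exact absurd hx (List.not_mem_nil)
  | append_singleton ys y ih =>
    have hys : ys.Nodup ∧ y ∉ ys := by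
      simp [List.nodup_append] at hnd
      exact ⟨hnd.1, fun hy => hnd.2 y hy rfl⟩
    have hmap : pvMapping (ys ++ [y]) = (pvMapping ys).insert y ((0 : Int) + ys.length) := by
      unfold pvMapping
      rw [PySem.List.enumerate_append, List.foldl_append]
      rfl
    rw [hmap, PySem.Dict.getD_insert]
    by_cases hxy : x = y
    · rw [if_pos hxy, hxy, List.idxOf_append_of_notMem hys.2]
      simp
    · rw [if_neg hxy]
      have hxys : x ∈ ys := by
        rcases List.mem_append.mp hx with h | h
        · exact h
        · exact absurd (List.mem_singleton.mp h) hxy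
      rw [ih hys.1 hxys, List.idxOf_append_of_mem hxys]

theorem pv_idx_beq (il : List String) (hnd : il.Nodup) (x : String) (hx : x ∈ il)
    (j : Nat) (hj : j < il.length) :
    (pvIdx il x == j) = (x == il[j]) := by
  have hidx : pvIdx il x = il.idxOf x := by
    unfold pvIdx
    rw [pv_mapping_getD il hnd x hx]
    exact Int.toNat_natCast _
  have hiff : (pvIdx il x = j) ↔ (x = il[j]) := by
    rw [hidx]
    constructor
    · intro h
      subst h
      exact (List.getElem_idxOf (by exact List.idxOf_lt_length_of_mem hx)).symm
    · intro h
      subst h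
      exact List.Nodup.idxOf_getElem hnd j hj
  by_cases h : pvIdx il x = j
  · rw [beq_iff_eq.mpr h, (beq_iff_eq.mpr (hiff.mp h))]
  · have h2 : ¬ (x = il[j]) := fun e => h (hiff.mpr e)
    rw [Bool.eq_iff_iff]
    simp [h, h2]

-- ===== VERDICT (by name: the statement is the Claim_ definition above) =====
theorem solution_spec : Claim_equal_solution := by
  intro il rp k _ hpre
  obtain ⟨hrep, hnd, hmem⟩ := hpre
  unfold Spec_solution
  rw [pv_A_char il rp k hrep]
  unfold solution_alt
  dsimp only
  have hpairsP : PySem.Set.ofList (rp.map (fun r =>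
      let w := PySem.Str.split₀ r
      (w.getD 0 "", w.getD 1 ""))) = pvP rp := rfl
  rw [hpairsP]
  have hfst_mem : ∀ p ∈ pvP rp,
      k ≤ (((pvP rp).countP (fun q => q.2 == p.2)) : Int) → p.1 ∈ il := by
    intro p hp hk
    obtain ⟨r, hr, hpr⟩ := List.mem_map.mp ((PySem.Set.mem_ofList _ _).mp hp)
    obtain ⟨a, b, hab⟩ := List.length_eq_two.mp (hrep r hr)
    have hhead := hmem r hr
    rw [hab] at hhead
    have hp2 : p.2 = (PySem.Str.split₀ r).getD 1 "" := by
      rw [← hpr]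
      rfl
    rw [hab] at hp2
    simp only [List.headI] at hhead
    have := hhead (by rw [← hp2] at *; exact hk)
    rw [← hpr]
    unfold pvPair
    rw [hab]
    simpa using this
  apply List.ext_getElem
  · rw [pv_foldl_bump_length, List.length_replicate, List.length_map]
  · intro j hj1 hj2
    have hjlen : j < il.length := by
      rw [pv_foldl_bump_length, List.length_replicate] at hj1
      exact hj1
    have hlenr : j < (List.replicate il.length (0 : Int)).length := by
      rw [List.length_replicate]
      exact hjlen
    rw [← List.getD_eq_getElem _ 0 hj1, pv_foldl_bump_getD _ _ j hlenr,
        List.getElem_map]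
    have hrep0 : (List.replicate il.length (0 : Int)).getD j 0 = 0 := by simp
    rw [hrep0]
    rw [pv_counts il rp k j]
    -- B side: the run-scan count over the sorted pair list
    rw [PySem.List.count_eq]
    have hsortPW : (PySem.List.sorted (pvP rp) (fun p => p.2)).Pairwise
        (fun a b => a.2 ≤ b.2) := PySem.List.sorted_pairwise (pvP rp) (fun p => p.2)
    rw [pv_runScan_count k _ [] hsortPW il[j], List.count_nil, Nat.zero_add]
    have hperm : (PySem.List.sorted (pvP rp) (fun p => p.2)).Perm (pvP rp) :=
      PySem.List.sorted_perm (pvP rp) (fun p => p.2) false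
    have hinner : ∀ x : String,
        (PySem.List.sorted (pvP rp) (fun p => p.2)).countP (fun q => q.2 == x)
          = (pvP rp).countP (fun q => q.2 == x) :=
      fun x => hperm.countP_eq _
    have hbigeq : (fun p : String × String => p.1 == il[j] &&
          decide (k ≤ ((PySem.List.sorted (pvP rp) (fun p => p.2)).countP
            (fun q => q.2 == p.2) : Int)))
        = (fun p : String × String => p.1 == il[j] &&
          decide (k ≤ ((pvP rp).countP (fun q => q.2 == p.2) : Int))) := by
      funext p
      rw [hinner p.2]
    rw [hbigeq, hperm.countP_eq]
    have hfinal : (pvP rp).countP (fun p =>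
          PySem.Set.contains (pvSusp rp k) p.2 && (pvIdx il p.1 == j))
        = (pvP rp).countP (fun p => p.1 == il[j] &&
          decide (k ≤ ((pvP rp).countP (fun q => q.2 == p.2) : Int))) := by
      apply List.countP_congr
      intro p hp
      rw [pv_contains_susp rp k hp]
      by_cases hk : k ≤ (((pvP rp).countP (fun q => q.2 == p.2)) : Int)
      · rw [pv_idx_beq il hnd p.1 (hfst_mem p hp hk) j hjlen, Bool.and_comm]
      · simp [hk]
    rw [hfinal]
    omega
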